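-- pv_equiv track=rewrite | github.com/researchgroupsoma/ESEM2019-FrameworkCodeSamples | frameworkCodeSamples/Versoes/nova/versoes.py | retornaArquivoInvertido
-- ===== SOURCE A (Python) =====
-- def retornaArquivoInvertido(arquivo):
-- 	aux = []
-- 	lista = []
-- 	for linha in arquivo:
-- 		aux.append(linha)
--
-- 	while (len (aux) > 0):
-- 		pop = aux.pop()
-- 		lista.append (pop)
-- 	return lista
-- ===== SOURCE B (Python) =====
-- def retornaArquivoInvertido(arquivo):
-- 	return arquivo[::-1]
-- ===== Notes on version B (the rewrite author's own statement) =====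
-- stated objective: idiomatic
-- what changed: Replaces A's two-phase copy-into-a-buffer-then-pop-it-empty loops with the idiomatic single reversing slice arquivo[::-1].
import Mathlib
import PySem

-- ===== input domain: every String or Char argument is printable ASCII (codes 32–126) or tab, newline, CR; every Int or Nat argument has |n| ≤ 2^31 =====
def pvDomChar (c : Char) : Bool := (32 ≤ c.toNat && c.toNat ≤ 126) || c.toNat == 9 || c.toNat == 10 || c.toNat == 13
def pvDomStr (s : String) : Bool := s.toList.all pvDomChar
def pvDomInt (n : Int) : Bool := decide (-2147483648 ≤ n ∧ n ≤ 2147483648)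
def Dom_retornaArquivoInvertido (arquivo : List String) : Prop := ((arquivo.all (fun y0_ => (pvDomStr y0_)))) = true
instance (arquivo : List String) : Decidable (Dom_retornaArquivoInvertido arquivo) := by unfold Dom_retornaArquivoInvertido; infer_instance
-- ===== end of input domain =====

-- B replaces A's two-phase fill-buffer-then-pop loops with the idiomatic one-step
-- reversing slice arquivo[::-1] (objective: idiomatic).

-- ===== PORT A =====
-- the while-loop: pop the last element of aux and append it to lista, until aux is empty
def pvWhileA (aux : List String) (lista : List String) : List String :=
  if aux.length > 0 then
    match hp : PySem.List.pop? aux (-1) with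
    | some (p, rest) =>
        have : rest.length < aux.length := by
          have h := PySem.List.length_of_pop?_eq_some aux hp
          simp at h
          omega
        pvWhileA rest (lista ++ [p])
    | none => lista   -- unreachable: aux nonempty
  else lista
termination_by aux.length

def retornaArquivoInvertido (arquivo : List String) : List String :=
  let aux := arquivo.foldl (fun a linha => a ++ [linha]) []
  let lista : List String := []
  pvWhileA aux lista

-- ===== PORT B =====
def retornaArquivoInvertido_alt (arquivo : List String) : List String :=
  (PySem.List.slice? arquivo none none (-1)).getD []  -- step is the literal -1, never 0, so slice? is some

-- ===== PRECONDITION & SPEC =====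
def Spec_retornaArquivoInvertido (arquivo : List String) (out : List String) : Prop := out = retornaArquivoInvertido_alt arquivo
instance (arquivo : List String) (out : List String) : Decidable (Spec_retornaArquivoInvertido arquivo out) := by unfold Spec_retornaArquivoInvertido; infer_instance

-- ===== CLAIM (what is proved, stated in full; the proofs are below) =====
def Claim_equal_retornaArquivoInvertido : Prop := ∀ (arquivo : List String), Dom_retornaArquivoInvertido arquivo → Spec_retornaArquivoInvertido arquivo (retornaArquivoInvertido arquivo)

-- ===== LEMMAS AND PROOFS =====
theorem pvWhileA_eq (aux lista : List String) : pvWhileA aux lista = lista ++ aux.reverse := by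
  induction aux using List.reverseRecOn generalizing lista with
  | nil => simp [pvWhileA]
  | append_singleton ys y ih =>
      rw [pvWhileA]
      simp only [List.length_append, List.length_singleton]
      rw [if_pos (by omega)]
      rw [PySem.List.pop?_last ys y]
      simp [ih]

theorem foldl_append_id (l acc : List String) :
    l.foldl (fun a linha => a ++ [linha]) acc = acc ++ l := by
  induction l generalizing acc with
  | nil => simp
  | cons x xs ih => simp [List.foldl, ih]

-- ===== VERDICT (by name: the statement is the Claim_ definition above) =====
theorem retornaArquivoInvertido_spec : Claim_equal_retornaArquivoInvertido := by
  intro arquivo _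
  unfold Spec_retornaArquivoInvertido retornaArquivoInvertido retornaArquivoInvertido_alt
  rw [foldl_append_id, pvWhileA_eq, PySem.List.slice?_none_none_neg_one]
  simp
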